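-- pv_equiv track=rewrite | github.com/CardinisCode/learning-python | finalproblems/finalproblem10encyption.py | break_my_message_down_into_char_pairs
-- ===== SOURCE A (Python) =====
-- def break_my_message_down_into_char_pairs(my_message):
--     structured_message = ""
--
--     for index in range(0, len(my_message)):
--         current_letter = my_message[index]
--         if index % 2 ==1:
--             structured_message += current_letter + " "
--         else:
--             structured_message += current_letter
--
--     # structured_message = structured_message
--     return structured_message.rstrip()
-- ===== SOURCE B (Python) =====
-- def break_my_message_down_into_char_pairs(my_message):
--     return " ".join(my_message[i:i+2] for i in range(0, len(my_message), 2)).rstrip()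
-- ===== Notes on version B (the rewrite author's own statement) =====
-- stated objective: simpler
-- what changed: Replaces the per-character index loop with a parity branch and conditional space-appending by slicing the string into stride-2 two-character chunks and joining them with a single space (keeping the final rstrip, which also strips whitespace coming from the input itself).
import Mathlib
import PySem

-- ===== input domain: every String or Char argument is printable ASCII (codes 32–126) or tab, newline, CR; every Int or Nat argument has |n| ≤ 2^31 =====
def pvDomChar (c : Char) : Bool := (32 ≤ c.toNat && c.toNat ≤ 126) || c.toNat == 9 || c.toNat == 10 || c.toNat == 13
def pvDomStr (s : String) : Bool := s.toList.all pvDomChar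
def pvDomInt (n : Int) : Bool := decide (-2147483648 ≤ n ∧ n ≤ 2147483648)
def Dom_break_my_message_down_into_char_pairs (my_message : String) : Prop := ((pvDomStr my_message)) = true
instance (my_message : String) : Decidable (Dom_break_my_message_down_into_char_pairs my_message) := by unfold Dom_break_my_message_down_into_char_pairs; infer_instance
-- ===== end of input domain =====

-- B replaces A's per-character index loop with parity branch by joining stride-2
-- two-character slices with a single space (simpler decomposition; same result).

-- ===== PORT A =====
-- loop body of A (the index is always in range here; the ' ' default of pyGetD is never used)
def pvStepA (cs acc : List Char) (index : Int) : List Char :=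
  let current_letter := PySem.List.pyGetD cs index ' '
  if PySem.Int.mod index 2 == 1 then acc ++ [current_letter, ' ']
  else acc ++ [current_letter]

def break_my_message_down_into_char_pairs (my_message : String) : String :=
  let cs := my_message.toList
  let structured_message :=
    (PySem.List.pyRange 0 (PySem.List.len cs) 1).foldl (pvStepA cs) []
  String.mk (PySem.Chars.rstrip structured_message)

-- ===== PORT B =====
def break_my_message_down_into_char_pairs_alt (my_message : String) : String :=
  let cs := my_message.toList
  let chunks := (PySem.List.pyRange 0 (PySem.List.len cs) 2).map
    (fun i => PySem.List.slice cs (some i) (some (i + 2)))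
  String.mk (PySem.Chars.rstrip (PySem.Chars.join [' '] chunks))

-- ===== PRECONDITION & SPEC =====
def Spec_break_my_message_down_into_char_pairs (my_message : String) (out : String) : Prop := out = break_my_message_down_into_char_pairs_alt my_message
instance (my_message : String) (out : String) : Decidable (Spec_break_my_message_down_into_char_pairs my_message out) := by unfold Spec_break_my_message_down_into_char_pairs; infer_instance

-- ===== CLAIM (what is proved, stated in full; the proofs are below) =====
def Claim_equal_break_my_message_down_into_char_pairs : Prop := ∀ (my_message : String), Dom_break_my_message_down_into_char_pairs my_message → Spec_break_my_message_down_into_char_pairs my_message (break_my_message_down_into_char_pairs my_message)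

-- ===== LEMMAS AND PROOFS =====

-- what A's loop produces from index n on
def pvGIdx (n : Nat) : List Char → List Char
  | [] => []
  | c :: t => (if n % 2 == 1 then [c, ' '] else [c]) ++ pvGIdx (n + 1) t

-- the list of consecutive 2-chunks
def pvChunks : List Char → List (List Char)
  | a :: b :: t => [a, b] :: pvChunks t
  | [a] => [[a]]
  | [] => []

lemma pv_mod_two (k : Nat) : (PySem.Int.mod (k : Int) 2 == 1) = (k % 2 == 1) := by
  simp [PySem.Int.mod, Int.fmod_eq_emod]
  omega

lemma pv_foldA_aux (cs : List Char) (n : Nat) : ∀ (k : Nat) (acc : List Char),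
    cs.length ≤ k + n →
    (PySem.List.pyRange (k : Int) (cs.length : Int) 1).foldl (pvStepA cs) acc
      = acc ++ pvGIdx k (cs.drop k) := by
  induction n with
  | zero =>
    intro k acc h
    rw [PySem.List.pyRange_one_eq_nil (by exact_mod_cast h)]
    rw [List.drop_eq_nil_of_le (by omega)]
    simp [pvGIdx]
  | succ n ih =>
    intro k acc h
    by_cases hk : cs.length ≤ k
    · rw [PySem.List.pyRange_one_eq_nil (by exact_mod_cast hk)]
      rw [List.drop_eq_nil_of_le (by omega)]
      simp [pvGIdx]
    · push_neg at hk
      rw [PySem.List.pyRange_one_cons (by exact_mod_cast hk)]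
      rw [List.foldl_cons]
      have hdrop : cs.drop k = cs[k] :: cs.drop (k + 1) :=
        List.drop_eq_getElem_cons hk
      have hget : PySem.List.pyGetD cs (k : Int) ' ' = cs[k] := by
        rw [PySem.List.pyGetD_natCast]
        simp [List.getD, hk]
      have : ((k : Int) + 1) = ((k + 1 : Nat) : Int) := by push_cast; ring
      rw [this, ih (k + 1) _ (by omega)]
      rw [hdrop]
      simp only [pvGIdx, pvStepA, hget, pv_mod_two]
      by_cases hp : k % 2 == 1 <;> simp [hp]

lemma pv_chunks_nonempty (t : List Char) (h : t ≠ []) : pvChunks t ≠ [] := by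
  match t with
  | [a] => simp [pvChunks]
  | a :: b :: r => simp [pvChunks]

lemma pv_gIdx_eq_join (cs : List Char) : ∀ (n : Nat), n % 2 = 0 →
    pvGIdx n cs = PySem.Chars.join [' '] (pvChunks cs)
      ++ (if cs.length % 2 == 0 && !cs.isEmpty then [' '] else []) := by
  induction cs using pvChunks.induct with
  | case3 =>
    intro n hn
    simp [pvGIdx, pvChunks, PySem.Chars.join_nil]
  | case2 a =>
    intro n hn
    simp [pvGIdx, pvChunks, PySem.Chars.join_singleton, hn]
  | case1 a b t ih =>
    intro n hn
    have h1 : (n % 2 == 1) = false := by simp [hn]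
    have h2 : ((n + 1) % 2 == 1) = true := by simp; omega
    simp only [pvGIdx, h1, h2, if_true, if_false]
    rw [ih (n + 2) (by omega)]
    match t with
    | [] => simp [pvChunks, PySem.Chars.join_singleton, PySem.Chars.join_nil]
    | c :: t' =>
      have hne := pv_chunks_nonempty (c :: t') (by simp)
      match hch : pvChunks (c :: t') with
      | [] => exact absurd hch hne
      | q :: rest =>
        simp only [pvChunks, hch, PySem.Chars.join_cons_cons]
        simp [List.length_cons]
        have hmm : (t'.length + 1 + 1 + 1) % 2 = (t'.length + 1) % 2 := by omega
        rw [hmm]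

lemma pv_rstrip_append_space (x : List Char) :
    PySem.Chars.rstrip (x ++ [' ']) = PySem.Chars.rstrip x := by
  have hsp : PySem.Chars.isspace ' ' = true := by decide
  simp [PySem.Chars.rstrip, List.dropWhile, hsp]

lemma pv_range2_eq (cs : List Char) :
    (PySem.List.pyRange 0 (cs.length : Int) 2).map
      (fun i => PySem.List.slice cs (some i) (some (i + 2)))
    = (List.range ((cs.length + 1) / 2)).map
      (fun k => (cs.drop (2 * k)).take 2) := by
  rw [PySem.List.pyRange_of_pos 0 (cs.length : Int) (by norm_num)]
  rw [List.map_map]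
  by_cases h : (0 : Int) < (cs.length : Int)
  · rw [if_pos h]
    have hcnt : (((cs.length : Int) - 0 + 2 - 1) / 2).toNat = (cs.length + 1) / 2 := by
      omega
    rw [hcnt]
    apply List.map_congr_left
    intro k hk
    simp only [Function.comp_apply, zero_add]
    have : (2 : Int) * (k : Int) = ((2 * k : Nat) : Int) := by push_cast; ring
    rw [this]
    have h2 : ((2 * k : Nat) : Int) + 2 = ((2 * k : Nat) : Int) + ((2 : Nat) : Int) := by norm_num
    rw [h2, PySem.List.slice_natCast_add]
  · rw [if_neg h]
    have : cs.length = 0 := by omega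
    rw [this]
    simp
lemma pv_chunks_eq (cs : List Char) :
    (List.range ((cs.length + 1) / 2)).map (fun k => (cs.drop (2 * k)).take 2)
      = pvChunks cs := by
  induction cs using pvChunks.induct with
  | case3 => simp [pvChunks]
  | case2 a => simp [pvChunks]
  | case1 a b t ih =>
    have hlen : ((a :: b :: t).length + 1) / 2 = (t.length + 1) / 2 + 1 := by
      simp [List.length_cons]; omega
    rw [hlen, List.range_succ_eq_map, List.map_cons, List.map_map]
    have htail : ∀ (f g : Nat → List Char), (∀ k, f k = g k) →
        (List.range ((t.length + 1) / 2)).map f = (List.range ((t.length + 1) / 2)).map g :=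
      fun f g h => List.map_congr_left (fun k _ => h k)
    rw [htail _ (fun k => List.take 2 (List.drop (2 * k) t)) (fun k => by
      have h2 : 2 * (k + 1) = 2 * k + 2 := by ring
      simp [Function.comp, h2, Nat.mul_add])]
    rw [ih]
    simp [pvChunks]

lemma pv_core (cs : List Char) :
    PySem.Chars.rstrip ((PySem.List.pyRange 0 (cs.length : Int) 1).foldl (pvStepA cs) [])
      = PySem.Chars.rstrip (PySem.Chars.join [' ']
          ((PySem.List.pyRange 0 (cs.length : Int) 2).map
            (fun i => PySem.List.slice cs (some i) (some (i + 2))))) := by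
  have hfold := pv_foldA_aux cs cs.length 0 [] (by omega)
  simp only [Nat.cast_zero, List.nil_append, List.drop_zero] at hfold
  rw [hfold]
  rw [pv_range2_eq, pv_chunks_eq]
  rw [pv_gIdx_eq_join cs 0 (by omega)]
  by_cases h : cs.length % 2 == 0 && !cs.isEmpty
  · rw [if_pos h, pv_rstrip_append_space]
  · rw [if_neg h, List.append_nil]

-- ===== VERDICT (by name: the statement is the Claim_ definition above) =====
theorem break_my_message_down_into_char_pairs_spec : Claim_equal_break_my_message_down_into_char_pairs := by
  intro my_message _
  unfold Spec_break_my_message_down_into_char_pairs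
  unfold break_my_message_down_into_char_pairs break_my_message_down_into_char_pairs_alt
  simp only [PySem.List.len_eq]
  rw [pv_core]
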